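-- pv_equiv track=rewrite | github.com/4nandes/AdventOfCode2021 | Day5/day5.py | iterateCoords
-- ===== SOURCE A (Python) =====
-- def diagonalMarks(board,y, start, end, upDown):
--     for x in range(start, end+1):
--         board[y][x] += 1
--         if upDown == 0:
--             y += 1
--         else:
--             y = y -1
--     return
--
-- def markBoard(board, xOry, start, end, horVert):
--     if start > end:
--         start, end = end, start
--     for x in range(start, end+1):
--         if horVert == 0:
--             board[x][xOry] += 1
--         else:
--             board[xOry][x] += 1
--     return
--
-- def iterateCoords(coords, board):
--     for coord in coords:
--         breakDown = coord.split(" ")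
--         start = [int(x) for x in breakDown[0].split(",")]
--         end = [int(x) for x in breakDown[2].split(",")]
--         if start[0] > end[0]:
--             start, end = end, start
--         if (start[0] == end[0]):
--             markBoard(board, start[0], start[1], end[1], 0)
--         elif (start[1] == end[1]):
--             markBoard(board, start[1], start[0], end[0], 1)
--         else:
--             if start[1] < end[1]:
--                 diagonalMarks(board, start[1], start[0], end[0], 0)
--             else:
--                 diagonalMarks(board, start[1], start[0], end[0], 1)
--     return board
-- ===== SOURCE B (Python) =====
-- def iterateCoords(coords, board):
--     # Same in-place board mutation and return value as the original,
--     # but one unified sign-step walk instead of three-way dispatch + two helpers.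
--     for coord in coords:
--         parts = coord.split(" ")
--         s = [int(v) for v in parts[0].split(",")]
--         e = [int(v) for v in parts[2].split(",")]
--         sx, sy, ex, ey = s[0], s[1], e[0], e[1]
--         if (sx, sy) > (ex, ey):
--             sx, sy, ex, ey = ex, ey, sx, sy
--         dx, dy = ex - sx, ey - sy
--         stepx = (dx > 0) - (dx < 0)
--         stepy = (dy > 0) - (dy < 0)
--         n = abs(dx) if dx != 0 else abs(dy)
--         x, y = sx, sy
--         for _ in range(n + 1):
--             board[y][x] += 1
--             x += stepx
--             y += stepy
--     return board
-- ===== Notes on version B (the rewrite author's own statement) =====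
-- stated objective: simpler
-- what changed: Replaced the three-way horizontal/vertical/diagonal dispatch into two helper functions by one unified loop: normalise each segment by a lexicographic endpoint swap, then walk n+1 sign-steps (stepx=sign(dx), stepy=sign(dy), n=|dx| if dx!=0 else |dy|) bumping board[y][x].
import Mathlib
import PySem

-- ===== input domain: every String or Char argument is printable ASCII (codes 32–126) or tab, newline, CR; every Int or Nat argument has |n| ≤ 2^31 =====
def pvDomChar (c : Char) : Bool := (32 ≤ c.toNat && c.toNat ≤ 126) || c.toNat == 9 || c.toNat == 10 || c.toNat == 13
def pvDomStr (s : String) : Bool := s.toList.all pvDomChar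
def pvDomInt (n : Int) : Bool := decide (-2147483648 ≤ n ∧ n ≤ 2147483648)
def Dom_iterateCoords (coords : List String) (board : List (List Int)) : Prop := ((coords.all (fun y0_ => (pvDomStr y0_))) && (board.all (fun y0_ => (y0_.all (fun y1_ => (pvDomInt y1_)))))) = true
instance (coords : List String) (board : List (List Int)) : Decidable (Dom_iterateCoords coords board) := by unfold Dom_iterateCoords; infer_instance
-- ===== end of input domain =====

-- B inlines A's three-way dispatch and its two helpers into one sign-step walk per segment;
-- both Pythons mutate `board` in place in the same way and return it — the ports model that value.

-- shared low-level helpers: parsing of one "x1,y1 -> x2,y2" line and the pythonic board[y][x] += 1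
def pvAllInts : List String → Option (List Int)
  | [] => some []
  | s :: rest =>
    match PySem.Int.ofStr? s, pvAllInts rest with
    | some v, some vs => some (v :: vs)
    | _, _ => none

def pvParse (coord : String) : Option (Int × Int × Int × Int) :=
  -- s.split(sep) with the literal nonempty seps " " and ",": split? is always `some` here
  let bd := (PySem.Str.split? coord " ").getD []
  match PySem.List.pyGet? bd 0, PySem.List.pyGet? bd 2 with
  | some t0, some t2 =>
    match pvAllInts ((PySem.Str.split? t0 ",").getD []), pvAllInts ((PySem.Str.split? t2 ",").getD []) with
    | some s, some e =>
      match PySem.List.pyGet? s 0, PySem.List.pyGet? s 1, PySem.List.pyGet? e 0, PySem.List.pyGet? e 1 with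
      | some a, some b, some c, some d => some (a, b, c, d)
      | _, _, _, _ => none
    | _, _ => none
  | _, _ => none

-- board[y][x] += 1 with Python index semantics; on IndexError (excluded by Pre_) leaves the board
def pvBump (b : List (List Int)) (y x : Int) : List (List Int) :=
  match PySem.List.pyGet? b y with
  | none => b
  | some row =>
    match PySem.List.pyGet? row x with
    | none => b
    | some v => PySem.List.pySetD b y (PySem.List.pySetD row x (v + 1))

-- ===== PORT A =====
def markBoardPort (board : List (List Int)) (xOry start_ end_ horVert : Int) : List (List Int) :=
  let p := if start_ > end_ then (end_, start_) else (start_, end_)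
  (PySem.List.pyRange p.1 (p.2 + 1) 1).foldl
    (fun b x => if horVert = 0 then pvBump b x xOry else pvBump b xOry x) board

def diagonalMarksPort (board : List (List Int)) (y start_ end_ upDown : Int) : List (List Int) :=
  ((PySem.List.pyRange start_ (end_ + 1) 1).foldl
    (fun (s : List (List Int) × Int) x =>
      (pvBump s.1 s.2 x, if upDown = 0 then s.2 + 1 else s.2 - 1)) (board, y)).1

def iterateCoords (coords : List String) (board : List (List Int)) : List (List Int) :=
  coords.foldl (fun b coord =>
    match pvParse coord with
    | none => b
    | some (x1, y1, x2, y2) =>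
      match (if x1 > x2 then (x2, y2, x1, y1) else (x1, y1, x2, y2)) with
      | (sx, sy, ex, ey) =>
        if sx = ex then markBoardPort b sx sy ey 0
        else if sy = ey then markBoardPort b sy sx ex 1
        else if sy < ey then diagonalMarksPort b sy sx ex 0
        else diagonalMarksPort b sy sx ex 1) board

-- ===== PORT B =====
def iterateCoords_alt (coords : List String) (board : List (List Int)) : List (List Int) :=
  coords.foldl (fun b coord =>
    match pvParse coord with
    | none => b
    | some (x1, y1, x2, y2) =>
      -- Python tuple comparison (sx, sy) > (ex, ey), ported by hand (lexicographic)
      match (if x1 > x2 ∨ (x1 = x2 ∧ y1 > y2) then (x2, y2, x1, y1) else (x1, y1, x2, y2)) with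
      | (sx, sy, ex, ey) =>
        let dx := ex - sx
        let dy := ey - sy
        let stepx : Int := (if dx > 0 then 1 else 0) - (if dx < 0 then 1 else 0)
        let stepy : Int := (if dy > 0 then 1 else 0) - (if dy < 0 then 1 else 0)
        let n : Int := if dx ≠ 0 then |dx| else |dy|
        (((PySem.List.pyRange 0 (n + 1) 1).foldl
          (fun (s : Int × Int × List (List Int)) _ =>
            (s.1 + stepx, s.2.1 + stepy, pvBump s.2.2 s.2.1 s.1)) (sx, sy, b)).2.2)) board

-- ===== PRECONDITION & SPEC =====
def pvCellOk (board : List (List Int)) (p : Int × Int) : Bool :=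
  ((PySem.List.pyGet? board p.1).bind (fun row => PySem.List.pyGet? row p.2)).isSome

-- "t is a comma-separated list of ≥ 2 ints" (all components must parse, as in A's comprehension)
def pvPointOk (t : String) : Bool :=
  let ps := (PySem.Str.split? t ",").getD []
  decide (2 ≤ ps.length) && ps.all (fun s => (PySem.Int.ofStr? s).isSome)

-- the i-th int of a comma-separated point (only read under pvPointOk)
def pvInt (t : String) (i : Int) : Int :=
  ((PySem.List.pyGet? ((PySem.Str.split? t ",").getD []) i).bind PySem.Int.ofStr?).getD 0

-- every cell on the segment (lex-normalised endpoints, sign steps, |dx| steps — |dy| when dx = 0)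
-- is a Python-valid (possibly negative) index pair of the board
def pvSegOk (board : List (List Int)) (x1 y1 x2 y2 : Int) : Bool :=
  match (if x1 > x2 ∨ (x1 = x2 ∧ y1 > y2) then (x2, y2, x1, y1) else (x1, y1, x2, y2)) with
  | (sx, sy, ex, ey) =>
    let n : Int := if ex - sx ≠ 0 then |ex - sx| else |ey - sy|
    let stx : Int := if ex - sx > 0 then 1 else 0
    let sty : Int := if ey - sy > 0 then 1 else if ey - sy < 0 then -1 else 0
    (PySem.List.pyRange 0 (n + 1) 1).all (fun i => pvCellOk board (sy + i * sty, sx + i * stx))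

def pvLineOk (board : List (List Int)) (c : String) : Bool :=
  let bd := (PySem.Str.split? c " ").getD []
  match PySem.List.pyGet? bd 0, PySem.List.pyGet? bd 2 with
  | some t0, some t2 =>
    pvPointOk t0 && pvPointOk t2 &&
      pvSegOk board (pvInt t0 0) (pvInt t0 1) (pvInt t2 0) (pvInt t2 1)
  | _, _ => false

-- Pre_ = exactly the inputs on which A returns: every line is "x,y -> x,y" with ≥ 3 space-separated
-- tokens and ≥ 2 int components per point, and every cell its segment touches is in range.
def Pre_iterateCoords (coords : List String) (board : List (List Int)) : Prop :=
  (coords.all (pvLineOk board)) = true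

instance (coords : List String) (board : List (List Int)) : Decidable (Pre_iterateCoords coords board) := by
  unfold Pre_iterateCoords; infer_instance

def pvWitness_iterateCoords : List String × List (List Int) :=
  (["0,0 -> 2,2", "2,1 -> 0,1"], [[0, 0, 0], [0, 0, 0], [0, 0, 0]])

def Spec_iterateCoords (coords : List String) (board : List (List Int)) (out : List (List Int)) : Prop := out = iterateCoords_alt coords board
instance (coords : List String) (board : List (List Int)) (out : List (List Int)) : Decidable (Spec_iterateCoords coords board out) := by unfold Spec_iterateCoords; infer_instance

-- ===== CLAIM (what is proved, stated in full; the proofs are below) =====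
def Claim_equal_iterateCoords : Prop := ∀ (coords : List String) (board : List (List Int)), Dom_iterateCoords coords board → Pre_iterateCoords coords board → Spec_iterateCoords coords board (iterateCoords coords board)

-- ===== LEMMAS AND PROOFS =====

-- the (y, x) cells a walk of k sign-steps from (x, y) touches
def pvCells : Nat → Int → Int → Int → Int → List (Int × Int)
  | 0, _, _, _, _ => []
  | k + 1, x, y, stx, sty => (y, x) :: pvCells k (x + stx) (y + sty) stx sty

-- marking a list of cells in order
def pvMarks (b : List (List Int)) (cells : List (Int × Int)) : List (List Int) :=
  cells.foldl (fun b p => pvBump b p.1 p.2) b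

theorem vertFold (c : Int) : ∀ (k : Nat) (lo : Int) (b : List (List Int)),
    (PySem.List.pyRange lo (lo + (k : Int)) 1).foldl (fun b x => pvBump b x c) b
      = pvMarks b (pvCells k c lo 0 1) := by
  intro k
  induction k with
  | zero => intro lo b; simp [PySem.List.pyRange_one_eq_nil, pvCells, pvMarks]
  | succ k ih =>
    intro lo b
    rw [PySem.List.pyRange_one_cons (by push_cast; omega)]
    have h : lo + ((k + 1 : Nat) : Int) = (lo + 1) + (k : Int) := by push_cast; ring
    rw [h]
    simpa [pvCells, pvMarks] using ih (lo + 1) (pvBump b lo c)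

theorem horFold (c : Int) : ∀ (k : Nat) (lo : Int) (b : List (List Int)),
    (PySem.List.pyRange lo (lo + (k : Int)) 1).foldl (fun b x => pvBump b c x) b
      = pvMarks b (pvCells k lo c 1 0) := by
  intro k
  induction k with
  | zero => intro lo b; simp [PySem.List.pyRange_one_eq_nil, pvCells, pvMarks]
  | succ k ih =>
    intro lo b
    rw [PySem.List.pyRange_one_cons (by push_cast; omega)]
    have h : lo + ((k + 1 : Nat) : Int) = (lo + 1) + (k : Int) := by push_cast; ring
    rw [h]
    simpa [pvCells, pvMarks] using ih (lo + 1) (pvBump b c lo)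

theorem diagFold (st : Int) : ∀ (k : Nat) (lo y : Int) (b : List (List Int)),
    ((PySem.List.pyRange lo (lo + (k : Int)) 1).foldl
      (fun (s : List (List Int) × Int) x => (pvBump s.1 s.2 x, s.2 + st)) (b, y)).1
      = pvMarks b (pvCells k lo y 1 st) := by
  intro k
  induction k with
  | zero => intro lo y b; simp [PySem.List.pyRange_one_eq_nil, pvCells, pvMarks]
  | succ k ih =>
    intro lo y b
    rw [PySem.List.pyRange_one_cons (by push_cast; omega)]
    have h : lo + ((k + 1 : Nat) : Int) = (lo + 1) + (k : Int) := by push_cast; ring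
    rw [h]
    simpa [pvCells, pvMarks] using ih (lo + 1) (y + st) (pvBump b y lo)

theorem bFold (stx sty : Int) : ∀ (k : Nat) (a x y : Int) (b : List (List Int)),
    ((PySem.List.pyRange a (a + (k : Int)) 1).foldl
      (fun (s : Int × Int × List (List Int)) _ =>
        (s.1 + stx, s.2.1 + sty, pvBump s.2.2 s.2.1 s.1)) (x, y, b)).2.2
      = pvMarks b (pvCells k x y stx sty) := by
  intro k
  induction k with
  | zero => intro a x y b; simp [PySem.List.pyRange_one_eq_nil, pvCells, pvMarks]
  | succ k ih =>
    intro a x y b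
    rw [PySem.List.pyRange_one_cons (by push_cast; omega)]
    have h : a + ((k + 1 : Nat) : Int) = (a + 1) + (k : Int) := by push_cast; ring
    rw [h]
    simpa [pvCells, pvMarks] using ih (a + 1) (x + stx) (y + sty) (pvBump b y x)

-- one cell regardless of the step direction
theorem pvCells_one (x y stx sty stx' sty' : Int) :
    pvCells 1 x y stx sty = pvCells 1 x y stx' sty' := by
  simp [pvCells]

-- B's inner loop as a pvMarks, with the signs spelled out
theorem bLoop (sx sy ex ey : Int) (b : List (List Int)) :
    (let dx := ex - sx
     let dy := ey - sy
     let stepx : Int := (if dx > 0 then 1 else 0) - (if dx < 0 then 1 else 0)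
     let stepy : Int := (if dy > 0 then 1 else 0) - (if dy < 0 then 1 else 0)
     let n : Int := if dx ≠ 0 then |dx| else |dy|
     (((PySem.List.pyRange 0 (n + 1) 1).foldl
       (fun (s : Int × Int × List (List Int)) _ =>
         (s.1 + stepx, s.2.1 + stepy, pvBump s.2.2 s.2.1 s.1)) (sx, sy, b)).2.2))
    = pvMarks b (pvCells ((if ex - sx ≠ 0 then (ex - sx).natAbs else (ey - sy).natAbs) + 1) sx sy
        ((if ex - sx > 0 then 1 else 0) - (if ex - sx < 0 then 1 else 0))
        ((if ey - sy > 0 then 1 else 0) - (if ey - sy < 0 then 1 else 0))) := by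
  dsimp only
  have h : (if ex - sx ≠ 0 then |ex - sx| else |ey - sy|) + 1
      = (0 : Int) + (((if ex - sx ≠ 0 then (ex - sx).natAbs else (ey - sy).natAbs) + 1 : Nat) : Int) := by
    split_ifs <;> rw [Int.abs_eq_natAbs] <;> omega
  rw [h, bFold]

-- markBoard's internal sort makes it symmetric in its two bounds
theorem markBoardPort_comm (b : List (List Int)) (c s e h : Int) :
    markBoardPort b c s e h = markBoardPort b c e s h := by
  unfold markBoardPort
  rcases lt_trichotomy s e with hlt | heq | hgt
  · rw [if_neg (by omega), if_pos (by omega)]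
  · subst heq; rfl
  · rw [if_pos (by omega), if_neg (by omega)]

-- A's three helper calls as pvMarks
theorem markVert (b : List (List Int)) (c lo hi : Int) (hle : lo ≤ hi) :
    markBoardPort b c lo hi 0 = pvMarks b (pvCells ((hi - lo).natAbs + 1) c lo 0 1) := by
  unfold markBoardPort
  rw [if_neg (by omega)]
  have hbody : (fun (b : List (List Int)) (x : Int) => if (0 : Int) = 0 then pvBump b x c else pvBump b c x)
      = fun b x => pvBump b x c := by funext b x; simp
  rw [hbody]
  have h : hi + 1 = lo + (((hi - lo).natAbs + 1 : Nat) : Int) := by omega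
  dsimp only
  rw [h, vertFold]

theorem markHor (b : List (List Int)) (c lo hi : Int) (hle : lo ≤ hi) :
    markBoardPort b c lo hi 1 = pvMarks b (pvCells ((hi - lo).natAbs + 1) lo c 1 0) := by
  unfold markBoardPort
  rw [if_neg (by omega)]
  have hbody : (fun (b : List (List Int)) (x : Int) => if (1 : Int) = 0 then pvBump b x c else pvBump b c x)
      = fun b x => pvBump b c x := by funext b x; simp
  rw [hbody]
  have h : hi + 1 = lo + (((hi - lo).natAbs + 1 : Nat) : Int) := by omega
  dsimp only
  rw [h, horFold]

theorem diagUp (b : List (List Int)) (y lo hi : Int) (hle : lo ≤ hi) :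
    diagonalMarksPort b y lo hi 0 = pvMarks b (pvCells ((hi - lo).natAbs + 1) lo y 1 1) := by
  unfold diagonalMarksPort
  have hbody : (fun (s : List (List Int) × Int) (x : Int) =>
      (pvBump s.1 s.2 x, if (0 : Int) = 0 then s.2 + 1 else s.2 - 1))
      = fun (s : List (List Int) × Int) x => (pvBump s.1 s.2 x, s.2 + 1) := by
    funext s x; simp
  rw [hbody]
  have h : hi + 1 = lo + (((hi - lo).natAbs + 1 : Nat) : Int) := by omega
  rw [h, diagFold]

theorem diagDown (b : List (List Int)) (y lo hi : Int) (hle : lo ≤ hi) :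
    diagonalMarksPort b y lo hi 1 = pvMarks b (pvCells ((hi - lo).natAbs + 1) lo y 1 (-1)) := by
  unfold diagonalMarksPort
  have hbody : (fun (s : List (List Int) × Int) (x : Int) =>
      (pvBump s.1 s.2 x, if (1 : Int) = 0 then s.2 + 1 else s.2 - 1))
      = fun (s : List (List Int) × Int) x => (pvBump s.1 s.2 x, s.2 + (-1)) := by
    funext s x; simp; ring
  rw [hbody]
  have h : hi + 1 = lo + (((hi - lo).natAbs + 1 : Nat) : Int) := by omega
  rw [h, diagFold]

-- A's dispatch equals B's sign-step walk, for a lexicographically normalised segment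
theorem stepEq (sx sy ex ey : Int) (hnorm : sx < ex ∨ (sx = ex ∧ sy ≤ ey)) (b : List (List Int)) :
    (if sx = ex then markBoardPort b sx sy ey 0
     else if sy = ey then markBoardPort b sy sx ex 1
     else if sy < ey then diagonalMarksPort b sy sx ex 0
     else diagonalMarksPort b sy sx ex 1)
    = (let dx := ex - sx
       let dy := ey - sy
       let stepx : Int := (if dx > 0 then 1 else 0) - (if dx < 0 then 1 else 0)
       let stepy : Int := (if dy > 0 then 1 else 0) - (if dy < 0 then 1 else 0)
       let n : Int := if dx ≠ 0 then |dx| else |dy|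
       (((PySem.List.pyRange 0 (n + 1) 1).foldl
         (fun (s : Int × Int × List (List Int)) _ =>
           (s.1 + stepx, s.2.1 + stepy, pvBump s.2.2 s.2.1 s.1)) (sx, sy, b)).2.2)) := by
  rw [bLoop]
  rcases hnorm with hx | ⟨hx, hy⟩
  · -- sx < ex
    rw [if_neg (show ¬ sx = ex by omega),
      if_pos (show ex - sx > 0 by omega), if_neg (show ¬ ex - sx < 0 by omega),
      if_pos (show ex - sx ≠ 0 by omega)]
    rcases lt_trichotomy sy ey with hy | hy | hy
    · rw [if_neg (show ¬ sy = ey by omega), if_pos hy, diagUp b sy sx ex (by omega),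
        if_pos (show ey - sy > 0 by omega), if_neg (show ¬ ey - sy < 0 by omega)]
      norm_num
    · subst hy
      rw [if_pos rfl, markHor b sy sx ex (by omega),
        if_neg (show ¬ sy - sy > 0 by omega), if_neg (show ¬ sy - sy < 0 by omega)]
      norm_num
    · rw [if_neg (show ¬ sy = ey by omega), if_neg (show ¬ sy < ey by omega),
        diagDown b sy sx ex (by omega),
        if_neg (show ¬ ey - sy > 0 by omega), if_pos (show ey - sy < 0 by omega)]
      norm_num
  · -- sx = ex, sy ≤ ey
    subst hx
    rw [if_pos rfl,
      if_neg (show ¬ sx - sx > 0 by omega), if_neg (show ¬ sx - sx < 0 by omega),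
      if_neg (show ¬ sx - sx ≠ 0 by omega)]
    rcases eq_or_lt_of_le hy with hy' | hy'
    · subst hy'
      rw [markVert b sx sy sy le_rfl,
        if_neg (show ¬ sy - sy > 0 by omega), if_neg (show ¬ sy - sy < 0 by omega),
        show (sy - sy).natAbs = 0 by omega]
      norm_num
      exact congrArg (pvMarks b) (pvCells_one sx sy 0 1 0 0)
    · rw [markVert b sx sy ey (by omega),
        if_pos (show ey - sy > 0 by omega), if_neg (show ¬ ey - sy < 0 by omega)]
      norm_num

-- per-coordinate step functions of the two ports agree
theorem stepCoordEq (b : List (List Int)) (coord : String) :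
    (match pvParse coord with
     | none => b
     | some (x1, y1, x2, y2) =>
       match (if x1 > x2 then (x2, y2, x1, y1) else (x1, y1, x2, y2)) with
       | (sx, sy, ex, ey) =>
         if sx = ex then markBoardPort b sx sy ey 0
         else if sy = ey then markBoardPort b sy sx ex 1
         else if sy < ey then diagonalMarksPort b sy sx ex 0
         else diagonalMarksPort b sy sx ex 1)
    = (match pvParse coord with
       | none => b
       | some (x1, y1, x2, y2) =>
         match (if x1 > x2 ∨ (x1 = x2 ∧ y1 > y2) then (x2, y2, x1, y1) else (x1, y1, x2, y2)) with
         | (sx, sy, ex, ey) =>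
           let dx := ex - sx
           let dy := ey - sy
           let stepx : Int := (if dx > 0 then 1 else 0) - (if dx < 0 then 1 else 0)
           let stepy : Int := (if dy > 0 then 1 else 0) - (if dy < 0 then 1 else 0)
           let n : Int := if dx ≠ 0 then |dx| else |dy|
           (((PySem.List.pyRange 0 (n + 1) 1).foldl
             (fun (s : Int × Int × List (List Int)) _ =>
               (s.1 + stepx, s.2.1 + stepy, pvBump s.2.2 s.2.1 s.1)) (sx, sy, b)).2.2)) := by
  cases hp : pvParse coord with
  | none => rfl
  | some q =>
    obtain ⟨x1, y1, x2, y2⟩ := q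
    dsimp only
    rcases lt_trichotomy x1 x2 with h | h | h
    · rw [if_neg (show ¬ x1 > x2 by omega),
        if_neg (show ¬ (x1 > x2 ∨ (x1 = x2 ∧ y1 > y2)) by omega)]
      exact stepEq x1 y1 x2 y2 (Or.inl h) b
    · subst h
      rw [if_neg (show ¬ x1 > x1 by omega)]
      by_cases hy : y1 > y2
      · rw [if_pos (show x1 > x1 ∨ (x1 = x1 ∧ y1 > y2) from Or.inr ⟨rfl, hy⟩)]
        have h2 := stepEq x1 y2 x1 y1 (Or.inr ⟨rfl, by omega⟩) b
        rw [if_pos rfl] at h2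
        dsimp only
        rw [if_pos (show (x1 : Int) = x1 from rfl), markBoardPort_comm]
        exact h2
      · rw [if_neg (show ¬ (x1 > x1 ∨ (x1 = x1 ∧ y1 > y2)) by omega)]
        exact stepEq x1 y1 x1 y2 (Or.inr ⟨rfl, by omega⟩) b
    · rw [if_pos (show x1 > x2 by omega),
        if_pos (show x1 > x2 ∨ (x1 = x2 ∧ y1 > y2) from Or.inl (show x1 > x2 by omega))]
      exact stepEq x2 y2 x1 y1 (Or.inl h) b

theorem iterateCoords_eq_alt (coords : List String) (board : List (List Int)) :
    iterateCoords coords board = iterateCoords_alt coords board := by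
  unfold iterateCoords iterateCoords_alt
  have hf : (fun (b : List (List Int)) (coord : String) =>
      match pvParse coord with
      | none => b
      | some (x1, y1, x2, y2) =>
        match (if x1 > x2 then (x2, y2, x1, y1) else (x1, y1, x2, y2)) with
        | (sx, sy, ex, ey) =>
          if sx = ex then markBoardPort b sx sy ey 0
          else if sy = ey then markBoardPort b sy sx ex 1
          else if sy < ey then diagonalMarksPort b sy sx ex 0
          else diagonalMarksPort b sy sx ex 1)
      = (fun (b : List (List Int)) (coord : String) =>
        match pvParse coord with
        | none => b
        | some (x1, y1, x2, y2) =>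
          match (if x1 > x2 ∨ (x1 = x2 ∧ y1 > y2) then (x2, y2, x1, y1) else (x1, y1, x2, y2)) with
          | (sx, sy, ex, ey) =>
            let dx := ex - sx
            let dy := ey - sy
            let stepx : Int := (if dx > 0 then 1 else 0) - (if dx < 0 then 1 else 0)
            let stepy : Int := (if dy > 0 then 1 else 0) - (if dy < 0 then 1 else 0)
            let n : Int := if dx ≠ 0 then |dx| else |dy|
            (((PySem.List.pyRange 0 (n + 1) 1).foldl
              (fun (s : Int × Int × List (List Int)) _ =>
                (s.1 + stepx, s.2.1 + stepy, pvBump s.2.2 s.2.1 s.1)) (sx, sy, b)).2.2)) := by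
    funext b coord
    exact stepCoordEq b coord
  rw [hf]

-- ===== VERDICT (by name: the statement is the Claim_ definition above) =====
theorem iterateCoords_spec : Claim_equal_iterateCoords := by
  intro coords board _ _
  exact iterateCoords_eq_alt coords board
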